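-- pv_equiv track=rewrite | github.com/jk-jung/problem-solving | codewars/4kyu/4_Circular Limited Sums.py | circular_limited_sums
-- ===== SOURCE A (Python) =====
-- def circular_limited_sums(n, m):
--     d1 = [[1 if x == y else 0 for x in range(m + 1)] for y in range(m + 1)]
--     for i in range(1, n):
--         d2 = [[0 for _ in range(m + 1)] for _ in range(m + 1)]
--         for x in range(m + 1):
--             for y in range(m + 1):
--                 for z in range(m + 1):
--                     if y + z <= m:
--                         d2[x][z] = (d2[x][z] + d1[x][y]) % 12345787
--         d1 = d2
--
--     r = 0
--     for x in range(m + 1):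
--         for y in range(m + 1):
--             if x + y <= m:
--                 r = (r + d1[x][y]) % 12345787
--
--     return r
-- ===== SOURCE B (Python) =====
-- def circular_limited_sums(n, m):
--     # Per-start-value row iteration with prefix sums: O(n*m^2) instead of A's O(n*m^3).
--     MOD = 12345787
--     size = m + 1
--     total = 0
--     for x in range(size):
--         row = [1 if y == x else 0 for y in range(size)]
--         for _ in range(n - 1):
--             pref = [0]
--             acc = 0
--             for v in row:
--                 acc = (acc + v) % MOD
--                 pref.append(acc)
--             row = [pref[size - z] for z in range(size)]
--         for y in range(size - x):
--             total = (total + row[y]) % MOD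
--     return total
-- ===== Notes on version B (the rewrite author's own statement) =====
-- stated objective: faster
-- what changed: Replaces A's (m+1)x(m+1) transfer-matrix update with a cubic-in-m inner loop by an independent per-start-value row iteration whose inner sum is a running prefix sum, cutting the step cost from O(m^3) to O(m^2).
import Mathlib
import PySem

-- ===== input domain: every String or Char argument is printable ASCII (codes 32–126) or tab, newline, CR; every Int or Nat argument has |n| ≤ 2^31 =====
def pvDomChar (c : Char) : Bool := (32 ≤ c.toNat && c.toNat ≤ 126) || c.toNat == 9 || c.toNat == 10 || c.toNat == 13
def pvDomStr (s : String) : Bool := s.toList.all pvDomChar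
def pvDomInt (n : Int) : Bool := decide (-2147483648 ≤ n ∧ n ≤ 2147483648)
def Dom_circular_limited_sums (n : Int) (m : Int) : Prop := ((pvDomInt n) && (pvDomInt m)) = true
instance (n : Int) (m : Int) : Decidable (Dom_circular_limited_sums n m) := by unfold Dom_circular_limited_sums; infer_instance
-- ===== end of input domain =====

-- B replaces A's cubic-in-m transfer step by a per-start-value row iteration with prefix
-- sums (O(n·m^2) instead of O(n·m^3)); equal return value on all inputs.

-- ===== PORT A =====
-- d[x][z] read/write (indices here always arise from range(m+1), hence nonnegative and in range)
def pvGet2 (d : List (List Int)) (x z : Int) : Int :=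
  PySem.List.pyGetD (PySem.List.pyGetD d x []) z 0

def pvSet2 (d : List (List Int)) (x z : Int) (v : Int) : List (List Int) :=
  PySem.List.pySetD d x (PySem.List.pySetD (PySem.List.pyGetD d x []) z v)

def circular_limited_sums (n : Int) (m : Int) : Int :=
  let d1 :=
    (PySem.List.pyRange 0 (m+1) 1).map (fun y =>
      (PySem.List.pyRange 0 (m+1) 1).map (fun x => if x = y then (1:Int) else 0))
  let d1 :=
    (PySem.List.pyRange 1 n 1).foldl (fun d1 _ =>
      (PySem.List.pyRange 0 (m+1) 1).foldl (fun d2 x =>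
        (PySem.List.pyRange 0 (m+1) 1).foldl (fun d2 y =>
          (PySem.List.pyRange 0 (m+1) 1).foldl (fun d2 z =>
            if y + z ≤ m then
              pvSet2 d2 x z (PySem.Int.mod (pvGet2 d2 x z + pvGet2 d1 x y) 12345787)
            else d2) d2) d2)
        ((PySem.List.pyRange 0 (m+1) 1).map (fun _ =>
          (PySem.List.pyRange 0 (m+1) 1).map (fun _ => (0:Int))))) d1
  (PySem.List.pyRange 0 (m+1) 1).foldl (fun r x =>
    (PySem.List.pyRange 0 (m+1) 1).foldl (fun r y =>
      if x + y ≤ m then PySem.Int.mod (r + pvGet2 d1 x y) 12345787 else r) r) 0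

-- ===== PORT B =====
def circular_limited_sums_alt (n : Int) (m : Int) : Int :=
  (PySem.List.pyRange 0 (m+1) 1).foldl (fun total x =>
    let row0 := (PySem.List.pyRange 0 (m+1) 1).map (fun y => if y = x then (1:Int) else 0)
    let row := (PySem.List.pyRange 0 (n-1) 1).foldl (fun row _ =>
      let pa := row.foldl (fun (pa : List Int × Int) v =>
        let acc := PySem.Int.mod (pa.2 + v) 12345787
        (pa.1 ++ [acc], acc)) ([0], 0)
      (PySem.List.pyRange 0 (m+1) 1).map (fun z => PySem.List.pyGetD pa.1 (m+1 - z) 0)) row0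
    (PySem.List.pyRange 0 (m+1 - x) 1).foldl (fun total y =>
      PySem.Int.mod (total + PySem.List.pyGetD row y 0) 12345787) total) 0

-- ===== PRECONDITION & SPEC =====
def Spec_circular_limited_sums (n : Int) (m : Int) (out : Int) : Prop := out = circular_limited_sums_alt n m
instance (n : Int) (m : Int) (out : Int) : Decidable (Spec_circular_limited_sums n m out) := by unfold Spec_circular_limited_sums; infer_instance

-- ===== CLAIM (what is proved, stated in full; the proofs are below) =====
def Claim_equal_circular_limited_sums : Prop := ∀ (n : Int) (m : Int), Dom_circular_limited_sums n m → Spec_circular_limited_sums n m (circular_limited_sums n m)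

-- ===== LEMMAS AND PROOFS =====

-- modulus rewrite
lemma pv_mod (a : Int) : PySem.Int.mod a 12345787 = a % 12345787 :=
  PySem.Int.mod_eq_emod_of_pos (by norm_num)

-- spec-side row machinery
def pvInd (s x : Nat) : List Int := (List.range s).map (fun y => if y = x then (1:Int) else 0)

def pvRowStep (s : Nat) (row : List Int) : List Int :=
  (List.range s).map (fun z => ((row.take (s - z)).sum) % 12345787)

def pvFinal (s c : Nat) : Int :=
  (List.range s).foldl (fun r x =>
    (List.range (s - x)).foldl (fun r y => (r + ((pvRowStep s)^[c] (pvInd s x)).getD y 0) % 12345787) r) 0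

lemma pv_length_rowStep (s : Nat) (row : List Int) : (pvRowStep s row).length = s := by
  simp [pvRowStep]

lemma pv_length_iter (s c : Nat) (x : Nat) : ((pvRowStep s)^[c] (pvInd s x)).length = s := by
  induction c with
  | zero => simp [pvInd]
  | succ c ih => rw [Function.iterate_succ_apply']; exact pv_length_rowStep s _

-- generic fold helpers
lemma pv_foldl_const {α β : Type} (F : β → β) (L : List α) : ∀ (init : β),
    L.foldl (fun d _ => F d) init = F^[L.length] init := by
  induction L with
  | nil => intro init; simp
  | cons a L ih => intro init; simp [List.foldl_cons, ih, Function.iterate_succ_apply]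

lemma pv_foldl_id {α β : Type} (L : List α) (init : β) : L.foldl (fun d _ => d) init = init := by
  induction L generalizing init <;> simp_all

lemma pv_set_getD_self (d : List (List Int)) (x : Nat) : d.set x (d.getD x []) = d := by
  by_cases h : x < d.length
  · rw [List.getD_eq_getElem _ _ h]; exact List.set_getElem_self h
  · rw [List.set_eq_of_length_le (by omega)]

lemma pv_lift {α : Type} (x : Nat) (g : List Int → α → List Int) : ∀ (L : List α) (d : List (List Int)),
    L.foldl (fun d a => d.set x (g (d.getD x []) a)) d = d.set x (L.foldl g (d.getD x [])) := by
  intro L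
  induction L with
  | nil => intro d; simpa using (pv_set_getD_self d x).symm
  | cons a L ih =>
    intro d
    by_cases h : x < d.length
    · simp only [List.foldl_cons]
      rw [ih]
      have hg : (d.set x (g (d.getD x []) a)).getD x [] = g (d.getD x []) a := by
        rw [List.getD_eq_getElem _ _ (by simpa using h)]
        exact List.getElem_set_self (by simpa using h)
      rw [hg, List.set_set]
    · have h1 : ∀ r, d.set x r = d := fun r => List.set_eq_of_length_le (by omega)
      simp only [List.foldl_cons, h1, ih]

-- one inner z-pass on a single row
lemma pv_zfold (m cv : Int) (y : Nat) (s : Nat) : ∀ (t : Nat), t ≤ s → ∀ (row : List Int), row.length = s →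
    (List.range t).foldl (fun row (z : Nat) =>
        if (y:Int) + (z:Int) ≤ m then row.set z ((row.getD z 0 + cv) % 12345787) else row) row
    = (List.range s).map (fun z =>
        if z < t ∧ (y:Int) + (z:Int) ≤ m then (row.getD z 0 + cv) % 12345787 else row.getD z 0) := by
  intro t
  induction t with
  | zero =>
    intro _ row hrow
    simp only [List.range_zero, List.foldl_nil]
    apply List.ext_getElem (by simp [hrow])
    intro k h1 h2
    simp only [List.getElem_map, List.getElem_range]
    have : ¬ (k < 0 ∧ (y:Int) + (k:Int) ≤ m) := by omega
    rw [if_neg this, List.getD_eq_getElem _ _ (by omega)]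
  | succ t ih =>
    intro ht row hrow
    rw [List.range_succ, List.foldl_append, ih (by omega) row hrow]
    simp only [List.foldl_cons, List.foldl_nil]
    by_cases hc : (y:Int) + (t:Int) ≤ m
    · rw [if_pos hc]
      apply List.ext_getElem (by simp)
      intro k h1 h2
      have hks : k < s := by simpa using h2
      have hgt : ((List.range s).map (fun z =>
          if z < t ∧ (y:Int) + (z:Int) ≤ m then (row.getD z 0 + cv) % 12345787 else row.getD z 0)).getD t 0
          = row.getD t 0 := by
        by_cases hts : t < s
        · rw [List.getD_eq_getElem _ _ (by simpa using hts)]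
          simp only [List.getElem_map, List.getElem_range]
          rw [if_neg (by omega)]
        · rw [List.getD_eq_default _ _ (by simpa using hts)]
          rw [List.getD_eq_default _ _ (by omega)]
      simp only [hgt]
      rw [List.getElem_set]
      by_cases hkt : t = k
      · subst hkt
        rw [if_pos rfl]
        simp only [List.getElem_map, List.getElem_range]
        rw [if_pos ⟨by omega, hc⟩]
      · rw [if_neg hkt]
        simp only [List.getElem_map, List.getElem_range]
        by_cases h3 : k < t ∧ (y:Int) + (k:Int) ≤ m
        · rw [if_pos h3, if_pos ⟨by omega, h3.2⟩]
        · rw [if_neg h3, if_neg (by omega)]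
    · rw [if_neg hc]
      apply List.map_congr_left
      intro k hk
      have hks : k < s := List.mem_range.mp hk
      by_cases h3 : k < t ∧ (y:Int) + (k:Int) ≤ m
      · rw [if_pos h3, if_pos ⟨by omega, h3.2⟩]
      · rw [if_neg h3]
        rw [if_neg (by rintro ⟨h4, h5⟩; exact h3 ⟨by omega, h5⟩)]

lemma pv_opt_sum (o : Option Int) : o.toList.sum = o.getD 0 := by cases o <;> simp

-- the full (y,z) double pass on a single row, starting from the zero row
lemma pv_yfold (m : Int) (s : Nat) (hs : (s:Int) = m+1) (d1row : List Int) :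
    ∀ (t : Nat), t ≤ s →
    (List.range t).foldl (fun row (y : Nat) =>
        (List.range s).foldl (fun row (z : Nat) =>
          if (y:Int) + (z:Int) ≤ m then row.set z ((row.getD z 0 + d1row.getD y 0) % 12345787) else row) row)
      ((List.range s).map (fun _ => (0:Int)))
    = (List.range s).map (fun z => ((d1row.take (min t (s - z))).sum) % 12345787) := by
  intro t
  induction t with
  | zero => simp
  | succ t ih =>
    intro ht
    rw [List.range_succ, List.foldl_append, ih (by omega)]
    simp only [List.foldl_cons, List.foldl_nil]
    rw [pv_zfold m (d1row.getD t 0) t s s (le_refl s) _ (by simp)]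
    apply List.map_congr_left
    intro z hz
    have hzs : z < s := List.mem_range.mp hz
    have hget : ((List.range s).map (fun z => ((d1row.take (min t (s - z))).sum) % 12345787)).getD z 0
        = ((d1row.take (min t (s - z))).sum) % 12345787 := by
      rw [List.getD_eq_getElem _ _ (by simpa using hzs)]
      simp
    rw [hget]
    by_cases hcz : (t:Int) + (z:Int) ≤ m
    · rw [if_pos ⟨hzs, hcz⟩]
      have hb : t + z + 1 ≤ s := by omega
      have h1 : min t (s - z) = t := by omega
      have h2 : min (t + 1) (s - z) = t + 1 := by omega
      rw [h1, h2, List.take_add_one, List.sum_append, pv_opt_sum]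
      rw [← List.getD_eq_getElem?_getD, Int.emod_add_emod]
    · rw [if_neg (by rintro ⟨_, h⟩; exact hcz h)]
      have : min t (s - z) = min (t + 1) (s - z) := by omega
      rw [this]

-- the outer x pass: each x replaces row x, computed from row x of the start matrix
lemma pv_xfold (H : Nat → List Int → List Int) (s : Nat) : ∀ (t : Nat) (d0 : List (List Int)),
    d0.length = s → t ≤ s →
    (List.range t).foldl (fun d x => d.set x (H x (d.getD x []))) d0
    = ((List.range t).map (fun x => H x (d0.getD x []))) ++ d0.drop t := by
  intro t
  induction t with
  | zero => intro d0 h0 _; simp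
  | succ t ih =>
    intro d0 h0 ht
    rw [List.range_succ, List.foldl_append, ih d0 h0 (by omega)]
    simp only [List.foldl_cons, List.foldl_nil]
    have hlen : ((List.range t).map (fun x => H x (d0.getD x []))).length = t := by simp
    have hget : (((List.range t).map (fun x => H x (d0.getD x []))) ++ d0.drop t).getD t []
        = d0.getD t [] := by
      rw [List.getD_eq_getElem?_getD, List.getElem?_append_right (by omega), hlen]
      simp only [Nat.sub_self, List.getElem?_drop, Nat.add_zero]
      rw [List.getD_eq_getElem?_getD]
    rw [hget]
    have hdrop : d0.drop t = d0.getD t [] :: d0.drop (t + 1) := by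
      rw [List.drop_eq_getElem_cons (by omega), List.getD_eq_getElem _ _ (by omega)]
    rw [List.map_append]
    rw [hdrop, List.set_append_right _ _ (by omega), hlen, Nat.sub_self]
    simp

-- the loop body of port A, named for the proofs (definitionally the port's fold body)
def pvAstepFn (m : Int) (d1 : List (List Int)) : List (List Int) :=
  (PySem.List.pyRange 0 (m+1) 1).foldl (fun d2 x =>
    (PySem.List.pyRange 0 (m+1) 1).foldl (fun d2 y =>
      (PySem.List.pyRange 0 (m+1) 1).foldl (fun d2 z =>
        if y + z ≤ m then
          pvSet2 d2 x z (PySem.Int.mod (pvGet2 d2 x z + pvGet2 d1 x y) 12345787)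
        else d2) d2) d2)
    ((PySem.List.pyRange 0 (m+1) 1).map (fun _ =>
      (PySem.List.pyRange 0 (m+1) 1).map (fun _ => (0:Int))))

lemma pvAstep (m : Int) (s : Nat) (hs : (s:Int) = m+1) (d1 : List (List Int)) :
    pvAstepFn m d1 = (List.range s).map (fun x => pvRowStep s (d1.getD x [])) := by
  unfold pvAstepFn
  rw [show (m+1 : Int) = (s:Int) from hs.symm, PySem.List.pyRange_zero_nat]
  simp only [List.foldl_map, List.map_map, Function.comp_def]
  simp only [pvSet2, pvGet2, PySem.List.pySetD_natCast, PySem.List.pyGetD_natCast, pv_mod]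
  have hz : ∀ (x y z : Nat) (d2 : List (List Int)),
      (if (y:Int) + (z:Int) ≤ m then
        d2.set x ((d2.getD x []).set z (((d2.getD x []).getD z 0 + (d1.getD x []).getD y 0) % 12345787))
      else d2)
      = d2.set x (if (y:Int) + (z:Int) ≤ m then
          (d2.getD x []).set z (((d2.getD x []).getD z 0 + (d1.getD x []).getD y 0) % 12345787)
        else d2.getD x []) := by
    intro x y z d2
    by_cases h : (y:Int) + (z:Int) ≤ m
    · rw [if_pos h, if_pos h]
    · rw [if_neg h, if_neg h, pv_set_getD_self]
  simp only [hz]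
  have hlift1 : ∀ (x y : Nat) (d2 : List (List Int)),
      (List.range s).foldl (fun d2 (z : Nat) => d2.set x
          (if (y:Int) + (z:Int) ≤ m then
            (d2.getD x []).set z (((d2.getD x []).getD z 0 + (d1.getD x []).getD y 0) % 12345787)
          else d2.getD x [])) d2
      = d2.set x ((List.range s).foldl (fun (row : List Int) (z : Nat) =>
          if (y:Int) + (z:Int) ≤ m then
            row.set z ((row.getD z 0 + (d1.getD x []).getD y 0) % 12345787)
          else row) (d2.getD x [])) :=
    fun x y d2 => pv_lift x (fun (row : List Int) (z : Nat) =>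
      if (y:Int) + (z:Int) ≤ m then
        row.set z ((row.getD z 0 + (d1.getD x []).getD y 0) % 12345787)
      else row) (List.range s) d2
  simp only [hlift1]
  have hlift2 : ∀ (x : Nat) (d2 : List (List Int)),
      (List.range s).foldl (fun d2 (y : Nat) => d2.set x
          ((List.range s).foldl (fun (row : List Int) (z : Nat) =>
            if (y:Int) + (z:Int) ≤ m then
              row.set z ((row.getD z 0 + (d1.getD x []).getD y 0) % 12345787)
            else row) (d2.getD x []))) d2
      = d2.set x ((List.range s).foldl (fun (row : List Int) (y : Nat) =>
          (List.range s).foldl (fun (row : List Int) (z : Nat) =>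
            if (y:Int) + (z:Int) ≤ m then
              row.set z ((row.getD z 0 + (d1.getD x []).getD y 0) % 12345787)
            else row) row) (d2.getD x [])) :=
    fun x d2 => pv_lift x (fun (row : List Int) (y : Nat) =>
      (List.range s).foldl (fun (row : List Int) (z : Nat) =>
        if (y:Int) + (z:Int) ≤ m then
          row.set z ((row.getD z 0 + (d1.getD x []).getD y 0) % 12345787)
        else row) row) (List.range s) d2
  simp only [hlift2]
  rw [pv_xfold (fun x row => (List.range s).foldl (fun row (y : Nat) =>
        (List.range s).foldl (fun row (z : Nat) =>
          if (y:Int) + (z:Int) ≤ m then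
            row.set z ((row.getD z 0 + (d1.getD x []).getD y 0) % 12345787)
          else row) row) row) s s _ (by simp) (le_refl s)]
  rw [List.drop_eq_nil_of_le (by simp), List.append_nil]
  apply List.map_congr_left
  intro x hx
  have hxs : x < s := List.mem_range.mp hx
  have hget : ((List.range s).map (fun _ => (List.range s).map (fun _ => (0:Int)))).getD x []
      = (List.range s).map (fun _ => (0:Int)) := by
    rw [List.getD_eq_getElem _ _ (by simpa using hxs)]; simp
  rw [hget, pv_yfold m s hs (d1.getD x []) s (le_refl s)]
  unfold pvRowStep
  apply List.map_congr_left
  intro z hz'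
  have : min s (s - z) = s - z := by omega
  rw [this]

lemma pv_prefix_fold (t s : Nat) (f : Int → Nat → Int) (ht : t ≤ s) : ∀ (r : Int),
    (List.range s).foldl (fun r y => if y < t then f r y else r) r = (List.range t).foldl f r := by
  intro r
  have hsplit : s = t + (s - t) := by omega
  rw [hsplit, List.range_add, List.foldl_append, List.foldl_map]
  have h1 : (List.range t).foldl (fun r y => if y < t then f r y else r) r
      = (List.range t).foldl f r := by
    apply PySem.List.foldl_congr_mem
    intro acc y hy
    rw [if_pos (List.mem_range.mp hy)]
  rw [h1]
  have h2 : (List.range (s - t)).foldl (fun r y => if t + y < t then f r (t + y) else r)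
        ((List.range t).foldl f r)
      = (List.range (s - t)).foldl (fun r _ => r) ((List.range t).foldl f r) := by
    apply PySem.List.foldl_congr_mem
    intro acc y _
    rw [if_neg (by omega)]
  rw [h2, pv_foldl_id]

lemma pv_A_eq (n m : Int) (hm : 0 ≤ m) :
    circular_limited_sums n m = pvFinal (m+1).toNat (n-1).toNat := by
  have hs : (((m+1).toNat : Nat) : Int) = m + 1 := by omega
  set s : Nat := (m+1).toNat with hsdef
  set c : Nat := (n-1).toNat with hcdef
  have h0 : circular_limited_sums n m =
      (PySem.List.pyRange 0 (m+1) 1).foldl (fun r x =>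
        (PySem.List.pyRange 0 (m+1) 1).foldl (fun r y =>
          if x + y ≤ m then
            PySem.Int.mod (r + pvGet2 ((PySem.List.pyRange 1 n 1).foldl (fun d1 _ => pvAstepFn m d1)
              ((PySem.List.pyRange 0 (m+1) 1).map (fun y =>
                (PySem.List.pyRange 0 (m+1) 1).map (fun x => if x = y then (1:Int) else 0)))) x y) 12345787
          else r) r) 0 := rfl
  rw [h0]
  rw [pv_foldl_const (pvAstepFn m), PySem.List.length_pyRange_one]
  have hiter : ∀ (k : Nat), (pvAstepFn m)^[k]
        ((PySem.List.pyRange 0 (m+1) 1).map (fun y =>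
          (PySem.List.pyRange 0 (m+1) 1).map (fun x => if x = y then (1:Int) else 0)))
      = (List.range s).map (fun x => (pvRowStep s)^[k] (pvInd s x)) := by
    intro k
    induction k with
    | zero =>
      rw [Function.iterate_zero, id, show (m+1 : Int) = (s:Int) from hs.symm,
        PySem.List.pyRange_zero_nat]
      simp only [List.map_map, Function.comp_def, Function.iterate_zero, id, pvInd]
      apply List.map_congr_left
      intro y _
      apply List.map_congr_left
      intro x _
      simp [Nat.cast_inj]
    | succ k ih =>
      rw [Function.iterate_succ_apply', ih, pvAstep m s hs]
      apply List.map_congr_left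
      intro x hx
      rw [List.getD_eq_getElem _ _ (by simpa using List.mem_range.mp hx)]
      simp only [List.getElem_map, List.getElem_range]
      rw [← Function.iterate_succ_apply' (pvRowStep s)]
  rw [show ((n:Int) - 1).toNat = c from rfl, hiter c]
  rw [show (m+1 : Int) = (s:Int) from hs.symm, PySem.List.pyRange_zero_nat]
  simp only [List.foldl_map, pvGet2, PySem.List.pyGetD_natCast, pv_mod]
  unfold pvFinal
  apply PySem.List.foldl_congr_mem
  intro r x hx
  have hxs : x < s := List.mem_range.mp hx
  have hget : ((List.range s).map (fun x => (pvRowStep s)^[c] (pvInd s x))).getD x []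
      = (pvRowStep s)^[c] (pvInd s x) := by
    rw [List.getD_eq_getElem _ _ (by simpa using hxs)]; simp
  simp only [hget]
  have hcond : (List.range s).foldl (fun r (y : Nat) =>
        if (x:Int) + (y:Int) ≤ m then (r + ((pvRowStep s)^[c] (pvInd s x)).getD y 0) % 12345787 else r) r
      = (List.range s).foldl (fun r (y : Nat) =>
        if y < s - x then (r + ((pvRowStep s)^[c] (pvInd s x)).getD y 0) % 12345787 else r) r := by
    apply PySem.List.foldl_congr_mem
    intro acc y _
    rw [if_congr (show ((x:Int) + (y:Int) ≤ m) ↔ (y < s - x) by omega) rfl rfl]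
  rw [hcond, pv_prefix_fold (s - x) s _ (by omega)]

-- the loop body of port B, named for the proofs (definitionally the port's fold body)
def pvBstepFn (m : Int) (row : List Int) : List Int :=
  let pa := row.foldl (fun (pa : List Int × Int) v =>
    let acc := PySem.Int.mod (pa.2 + v) 12345787
    (pa.1 ++ [acc], acc)) ([0], 0)
  (PySem.List.pyRange 0 (m+1) 1).map (fun z => PySem.List.pyGetD pa.1 (m+1 - z) 0)

lemma pv_pref (row : List Int) :
    row.foldl (fun (pa : List Int × Int) v =>
        let acc := PySem.Int.mod (pa.2 + v) 12345787
        (pa.1 ++ [acc], acc)) ([0], 0)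
    = ((List.range (row.length + 1)).map (fun k => ((row.take k).sum) % 12345787),
        row.sum % 12345787) := by
  induction row using List.reverseRecOn with
  | nil => simp
  | append_singleton l a ih =>
    rw [List.foldl_append, ih]
    simp only [List.foldl_cons, List.foldl_nil, pv_mod]
    rw [Prod.mk.injEq]
    constructor
    · conv_rhs => rw [List.length_append, List.length_singleton, List.range_succ, List.map_append]
      congr 1
      · apply List.map_congr_left
        intro k hk
        rw [List.take_append_of_le_length (by simpa using Nat.lt_succ_iff.mp (List.mem_range.mp hk))]
      · simp only [List.map_cons, List.map_nil]
        rw [List.take_of_length_le (by simp), List.sum_append, Int.emod_add_emod]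
        simp
    · rw [List.sum_append, Int.emod_add_emod]
      simp
lemma pv_B_step (m : Int) (s : Nat) (hs : (s:Int) = m+1) (row : List Int) (hrow : row.length = s) :
    pvBstepFn m row = pvRowStep s row := by
  unfold pvBstepFn
  rw [pv_pref]
  rw [show (m+1 : Int) = (s:Int) from hs.symm, PySem.List.pyRange_zero_nat, List.map_map]
  unfold pvRowStep
  apply List.map_congr_left
  intro z hz
  have hzs : z < s := List.mem_range.mp hz
  simp only [Function.comp_def]
  rw [show (s:Int) - (z:Int) = ((s - z : Nat) : Int) by omega, PySem.List.pyGetD_natCast]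
  rw [List.getD_eq_getElem _ _ (by simp only [List.length_map, List.length_range, hrow]; omega)]
  simp only [List.getElem_map, List.getElem_range]

lemma pv_B_eq (n m : Int) (hm : 0 ≤ m) :
    circular_limited_sums_alt n m = pvFinal (m+1).toNat (n-1).toNat := by
  have hs : (((m+1).toNat : Nat) : Int) = m + 1 := by omega
  set s : Nat := (m+1).toNat with hsdef
  set c : Nat := (n-1).toNat with hcdef
  have h0 : circular_limited_sums_alt n m =
      (PySem.List.pyRange 0 (m+1) 1).foldl (fun total x =>
        (PySem.List.pyRange 0 (m+1-x) 1).foldl (fun total y =>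
          PySem.Int.mod (total + PySem.List.pyGetD
            ((PySem.List.pyRange 0 (n-1) 1).foldl (fun row _ => pvBstepFn m row)
              ((PySem.List.pyRange 0 (m+1) 1).map (fun y => if y = x then (1:Int) else 0))) y 0) 12345787)
          total) 0 := rfl
  rw [h0]
  rw [show (m+1 : Int) = (s:Int) from hs.symm, PySem.List.pyRange_zero_nat]
  simp only [List.foldl_map, List.map_map, Function.comp_def]
  unfold pvFinal
  apply PySem.List.foldl_congr_mem
  intro r x hx
  have hxs : x < s := List.mem_range.mp hx
  have hrow0 : (List.range s).map (fun k : Nat => if (k:Int) = (x:Int) then (1:Int) else 0)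
      = pvInd s x := by
    unfold pvInd
    apply List.map_congr_left
    intro y _
    simp [Nat.cast_inj]
  have hiter : (PySem.List.pyRange 0 (n-1) 1).foldl (fun row _ => pvBstepFn m row)
        ((List.range s).map (fun k : Nat => if (k:Int) = (x:Int) then (1:Int) else 0))
      = (pvRowStep s)^[c] (pvInd s x) := by
    rw [pv_foldl_const (pvBstepFn m), PySem.List.length_pyRange_one, hrow0]
    have : ((n:Int) - 1 - 0).toNat = c := by omega
    rw [this]
    clear hrow0
    induction c with
    | zero => simp
    | succ k ih =>
      rw [Function.iterate_succ_apply', Function.iterate_succ_apply', ih]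
      exact pv_B_step m s hs _ (pv_length_iter s k x)
  rw [show (s:Int) - (x:Int) = ((s - x : Nat) : Int) by omega, PySem.List.pyRange_zero_nat]
  rw [List.foldl_map]
  apply PySem.List.foldl_congr_mem
  intro acc y _
  rw [hiter, PySem.List.pyGetD_natCast, pv_mod]


-- ===== VERDICT (by name: the statement is the Claim_ definition above) =====
theorem circular_limited_sums_spec : Claim_equal_circular_limited_sums := by
  intro n m _
  unfold Spec_circular_limited_sums
  by_cases hm : 0 ≤ m
  · rw [pv_A_eq n m hm, pv_B_eq n m hm]
  · have hnil : PySem.List.pyRange 0 (m+1) 1 = [] := PySem.List.pyRange_one_eq_nil (by omega)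
    unfold circular_limited_sums circular_limited_sums_alt
    rw [hnil]
    simp
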